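-- pv_equiv track=rewrite | github.com/OxQuasar/nous-memories | iching/kw-final/01_ordering_montecarlo.py | check_anti_clustering_fast
-- ===== SOURCE A (Python) =====
-- def check_anti_clustering_fast(ordering_indices, pd):
--     """Fast anti-clustering check using precomputed element pairs."""
--     seq = []
--     for i in ordering_indices:
--         seq.append(pd["h1_elem_pair"][i])
--         seq.append(pd["h2_elem_pair"][i])
--     for i in range(len(seq) - 1):
--         if seq[i] == seq[i + 1]:
--             return False
--     return True
-- ===== SOURCE B (Python) =====
-- def check_anti_clustering_fast(ordering_indices, pd):
--     """One pass over ordering_indices: track the previous block's h2 element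
--     instead of building the interleaved sequence."""
--     h1 = pd["h1_elem_pair"]
--     h2 = pd["h2_elem_pair"]
--     prev = None
--     first = True
--     for i in ordering_indices:
--         e1 = h1[i]
--         e2 = h2[i]
--         if (not first and prev == e1) or e1 == e2:
--             return False
--         prev = e2
--         first = False
--     return True
-- ===== Notes on version B (the rewrite author's own statement) =====
-- stated objective: simpler
-- what changed: B drops the intermediate interleaved seq list and the second index loop: a single pass over ordering_indices keeps only the previous block's h2 element and checks the within-block and across-block adjacencies on the fly. B looks the two lists up once before the loop, so on an empty ordering with a missing key B raises where A vacuously returns True; Pre_ excludes missing-key inputs.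
-- outside the precondition, e.g. on check_anti_clustering_fast([], {}): A returns True, B raises KeyError
import Mathlib
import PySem

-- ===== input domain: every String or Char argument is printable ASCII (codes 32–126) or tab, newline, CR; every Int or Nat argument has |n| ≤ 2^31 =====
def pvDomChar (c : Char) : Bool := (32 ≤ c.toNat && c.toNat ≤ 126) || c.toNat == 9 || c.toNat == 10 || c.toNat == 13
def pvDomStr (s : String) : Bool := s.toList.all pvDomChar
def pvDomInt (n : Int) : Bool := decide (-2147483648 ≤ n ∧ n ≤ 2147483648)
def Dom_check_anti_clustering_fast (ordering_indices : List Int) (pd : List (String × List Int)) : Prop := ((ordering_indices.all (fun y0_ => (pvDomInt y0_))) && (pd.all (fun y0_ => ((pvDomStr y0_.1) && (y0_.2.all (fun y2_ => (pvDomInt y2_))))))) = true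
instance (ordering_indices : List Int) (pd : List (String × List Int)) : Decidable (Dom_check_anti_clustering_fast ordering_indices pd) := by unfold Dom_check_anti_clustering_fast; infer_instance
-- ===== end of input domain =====

-- B drops the intermediate interleaved list and the second index loop: one pass tracking
-- the previous block's h2 element (objective: simpler).

-- ===== PORT A =====
-- second loop of A: 'for i in range(len(seq)-1): if seq[i] == seq[i+1]: return False'
def pvACheck (seq : List Int) : List Int → Bool
  | [] => true
  | i :: rest =>
    if PySem.List.pyGetD seq i 0 == PySem.List.pyGetD seq (i + 1) 0 then false
    else pvACheck seq rest

def check_anti_clustering_fast (ordering_indices : List Int) (pd : List (String × List Int)) : Bool :=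
  let seq := ordering_indices.foldl
    (fun s i =>
      (s ++ [PySem.List.pyGetD ((PySem.Dict.get? (PySem.Dict.mk pd) "h1_elem_pair").getD []) i 0])
        ++ [PySem.List.pyGetD ((PySem.Dict.get? (PySem.Dict.mk pd) "h2_elem_pair").getD []) i 0]) []
  pvACheck seq (PySem.List.pyRange 0 ((seq.length : Int) - 1) 1)

-- ===== PORT B =====
-- B's loop: prev = None/first flag is modelled by Option Int (none = first iteration)
def pvBLoop (h1 h2 : List Int) : Option Int → List Int → Bool
  | _, [] => true
  | prev, i :: rest =>
    let e1 := PySem.List.pyGetD h1 i 0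
    let e2 := PySem.List.pyGetD h2 i 0
    if (prev == some e1) || (e1 == e2) then false
    else pvBLoop h1 h2 (some e2) rest

def check_anti_clustering_fast_alt (ordering_indices : List Int) (pd : List (String × List Int)) : Bool :=
  let h1 := (PySem.Dict.get? (PySem.Dict.mk pd) "h1_elem_pair").getD []
  let h2 := (PySem.Dict.get? (PySem.Dict.mk pd) "h2_elem_pair").getD []
  pvBLoop h1 h2 none ordering_indices

-- ===== PRECONDITION & SPEC =====
-- Pre_ excludes the inputs where Python raises: a missing "h1_elem_pair"/"h2_elem_pair" key
-- (KeyError) or an ordering index outside either list's Python index range (IndexError); with a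
-- key missing and an empty ordering A vacuously returns True while B's up-front lookup raises,
-- so those inputs are excluded too (B itself raises there).
def Pre_check_anti_clustering_fast (ordering_indices : List Int) (pd : List (String × List Int)) : Prop :=
  (PySem.Dict.get? (PySem.Dict.mk pd) "h1_elem_pair").isSome = true ∧
  (PySem.Dict.get? (PySem.Dict.mk pd) "h2_elem_pair").isSome = true ∧
  ∀ i ∈ ordering_indices,
    PySem.Raise.InRange ((PySem.Dict.get? (PySem.Dict.mk pd) "h1_elem_pair").getD []).length i ∧
    PySem.Raise.InRange ((PySem.Dict.get? (PySem.Dict.mk pd) "h2_elem_pair").getD []).length i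
instance (ordering_indices : List Int) (pd : List (String × List Int)) : Decidable (Pre_check_anti_clustering_fast ordering_indices pd) := by unfold Pre_check_anti_clustering_fast; infer_instance

def pvWitness_check_anti_clustering_fast : List Int × (List (String × List Int)) :=
  ([0, 2, 1, -1], [("h1_elem_pair", [1, 2, 3]), ("h2_elem_pair", [4, 5, 6])])

def Spec_check_anti_clustering_fast (ordering_indices : List Int) (pd : List (String × List Int)) (out : Bool) : Prop := out = check_anti_clustering_fast_alt ordering_indices pd
instance (ordering_indices : List Int) (pd : List (String × List Int)) (out : Bool) : Decidable (Spec_check_anti_clustering_fast ordering_indices pd out) := by unfold Spec_check_anti_clustering_fast; infer_instance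

-- ===== CLAIM (what is proved, stated in full; the proofs are below) =====
def Claim_equal_check_anti_clustering_fast : Prop := ∀ (ordering_indices : List Int) (pd : List (String × List Int)), Dom_check_anti_clustering_fast ordering_indices pd → Pre_check_anti_clustering_fast ordering_indices pd → Spec_check_anti_clustering_fast ordering_indices pd (check_anti_clustering_fast ordering_indices pd)

-- ===== LEMMAS AND PROOFS =====

-- the interleaved sequence A builds
def pvSeqOf (h1 h2 : List Int) (oi : List Int) : List Int :=
  oi.flatMap (fun i => [PySem.List.pyGetD h1 i 0, PySem.List.pyGetD h2 i 0])

-- adjacency check on the whole list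
def pvAdj : List Int → Bool
  | a :: b :: t => if a == b then false else pvAdj (b :: t)
  | _ => true

-- B's loop state as a spec: head must also differ from prev (when prev is set)
def pvChain (prev : Option Int) : List Int → Bool
  | [] => true
  | x :: t => if prev == some x then false else pvAdj (x :: t)

theorem pvFoldl_seq (h1 h2 : List Int) : ∀ (oi acc : List Int),
    oi.foldl (fun s i => (s ++ [PySem.List.pyGetD h1 i 0]) ++ [PySem.List.pyGetD h2 i 0]) acc
      = acc ++ pvSeqOf h1 h2 oi := by
  intro oi
  induction oi with
  | nil => intro acc; simp [pvSeqOf]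
  | cons i rest ih =>
    intro acc
    simp only [List.foldl_cons, ih, pvSeqOf, List.flatMap_cons]
    simp

theorem pvAdj_short (l : List Int) (h : l.length ≤ 1) : pvAdj l = true := by
  match l, h with
  | [], _ => rfl
  | [_], _ => rfl

theorem pvAdj_cons_eq_chain (p : Int) (l : List Int) : pvAdj (p :: l) = pvChain (some p) l := by
  cases l with
  | nil => rfl
  | cons x t => simp [pvAdj, pvChain]

theorem pvSeqOf_cons (h1 h2 : List Int) (i : Int) (rest : List Int) :
    pvSeqOf h1 h2 (i :: rest)
      = PySem.List.pyGetD h1 i 0 :: PySem.List.pyGetD h2 i 0 :: pvSeqOf h1 h2 rest := by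
  simp [pvSeqOf]

theorem pvAdj_eq_chain_none (l : List Int) : pvAdj l = pvChain none l := by
  cases l with
  | nil => rfl
  | cons x t => simp [pvChain]

theorem pvBLoop_eq_chain (h1 h2 : List Int) : ∀ (oi : List Int) (prev : Option Int),
    pvBLoop h1 h2 prev oi = pvChain prev (pvSeqOf h1 h2 oi) := by
  intro oi
  induction oi with
  | nil => intro prev; cases prev <;> rfl
  | cons i rest ih =>
    intro prev
    rw [pvSeqOf_cons]
    show (if (prev == some (PySem.List.pyGetD h1 i 0))
            || (PySem.List.pyGetD h1 i 0 == PySem.List.pyGetD h2 i 0) then false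
          else pvBLoop h1 h2 (some (PySem.List.pyGetD h2 i 0)) rest) = _
    rw [ih]
    generalize pvSeqOf h1 h2 rest = s
    set e1 := PySem.List.pyGetD h1 i 0
    set e2 := PySem.List.pyGetD h2 i 0
    have h1' : pvChain prev (e1 :: e2 :: s) = if prev == some e1 then false else pvAdj (e1 :: e2 :: s) := rfl
    have h2' : pvAdj (e1 :: e2 :: s) = if e1 == e2 then false else pvAdj (e2 :: s) := rfl
    rw [h1', h2', pvAdj_cons_eq_chain]
    cases hp : (prev == some e1) <;> cases he : (e1 == e2) <;> simp

theorem pvACheck_drop (seq : List Int) : ∀ (n k : Nat), seq.length - 1 - k = n →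
    pvACheck seq (PySem.List.pyRange (k : Int) ((seq.length : Int) - 1) 1) = pvAdj (seq.drop k) := by
  intro n
  induction n with
  | zero =>
    intro k hk
    have hge : (seq.length : Int) - 1 ≤ (k : Int) := by omega
    rw [PySem.List.pyRange_one_eq_nil hge]
    have : (seq.drop k).length ≤ 1 := by simp; omega
    rw [pvAdj_short _ this]; rfl
  | succ m ih =>
    intro k hk
    have hlt : (k : Int) < (seq.length : Int) - 1 := by omega
    have hk1 : k + 1 < seq.length := by omega
    have hk0 : k < seq.length := by omega
    have cast1 : (k : Int) + 1 = ((k + 1 : Nat) : Int) := by push_cast; ring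
    have g0 : PySem.List.pyGetD seq (k : Int) 0 = seq[k] := by
      rw [PySem.List.pyGetD_natCast]; exact List.getD_eq_getElem _ _ hk0
    have g1 : PySem.List.pyGetD seq (((k + 1 : Nat) : Int)) 0 = seq[k + 1] := by
      rw [PySem.List.pyGetD_natCast]; exact List.getD_eq_getElem _ _ hk1
    have ihk : seq.length - 1 - (k + 1) = m := by omega
    rw [PySem.List.pyRange_one_cons hlt]
    simp only [pvACheck]
    rw [cast1, g0, g1, ih (k + 1) ihk,
      List.drop_eq_getElem_cons hk0, List.drop_eq_getElem_cons hk1]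
    have : pvAdj (seq[k] :: seq[k + 1] :: List.drop (k + 2) seq)
        = if seq[k] == seq[k + 1] then false else pvAdj (seq[k + 1] :: List.drop (k + 2) seq) := rfl
    rw [this]

-- ===== VERDICT (by name: the statement is the Claim_ definition above) =====
theorem check_anti_clustering_fast_spec : Claim_equal_check_anti_clustering_fast := by
  intro oi pd _ _
  unfold Spec_check_anti_clustering_fast check_anti_clustering_fast check_anti_clustering_fast_alt
  simp only [pvFoldl_seq, List.nil_append, pvBLoop_eq_chain]
  have h := pvACheck_drop
    (pvSeqOf ((PySem.Dict.get? (PySem.Dict.mk pd) "h1_elem_pair").getD [])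
             ((PySem.Dict.get? (PySem.Dict.mk pd) "h2_elem_pair").getD []) oi) _ 0 rfl
  simp only [Nat.cast_zero, List.drop_zero] at h
  rw [h, pvAdj_eq_chain_none]
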